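-- pv_equiv track=rewrite | github.com/srpoyrek/sliding-squares | find_hardest_workspace.py | _valid_block_positions
-- ===== SOURCE A (Python) =====
-- def _valid_block_positions(rows, cols, free_cells, n):
--     valid = set()
--     for r in range(rows - n + 1):
--         for c in range(cols - n + 1):
--             ok = True
--             for ir in range(n):
--                 for ic in range(n):
--                     if (r + ir, c + ic) not in free_cells:
--                         ok = False
--                         break
--                 if not ok:
--                     break
--             if ok:
--                 valid.add((r, c))
--     return valid
-- ===== SOURCE B (Python) =====
-- def _valid_block_positions(rows, cols, free_cells, n):
--     # sparse scatter-add: each (distinct) free cell increments a counter for every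
--     # candidate top-left position whose n x n block covers it; a position is valid
--     # iff its counter reaches n*n
--     count = {}
--     for (i, j) in set(free_cells):
--         for r in range(max(i - n + 1, 0), min(i, rows - n) + 1):
--             for c in range(max(j - n + 1, 0), min(j, cols - n) + 1):
--                 count[(r, c)] = count.get((r, c), 0) + 1
--     nn = n * n
--     return {(r, c)
--             for r in range(rows - n + 1)
--             for c in range(cols - n + 1)
--             if count.get((r, c), 0) == nn}
-- ===== Notes on version B (the rewrite author's own statement) =====
-- stated objective: alternative
-- what changed: Replaces A's quadruple loop, which rescans the free-cell list for every cell of every candidate block, by a sparse scatter-add: each distinct free cell increments a counter for the candidate top-left positions whose n x n block covers it, and a position is valid iff its counter reaches n*n.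
-- outside the precondition, e.g. on _valid_block_positions(-1, -1, {(1, 1), (0, 0)}, -1): A returns {(0, 0)}, B returns set()
import Mathlib
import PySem

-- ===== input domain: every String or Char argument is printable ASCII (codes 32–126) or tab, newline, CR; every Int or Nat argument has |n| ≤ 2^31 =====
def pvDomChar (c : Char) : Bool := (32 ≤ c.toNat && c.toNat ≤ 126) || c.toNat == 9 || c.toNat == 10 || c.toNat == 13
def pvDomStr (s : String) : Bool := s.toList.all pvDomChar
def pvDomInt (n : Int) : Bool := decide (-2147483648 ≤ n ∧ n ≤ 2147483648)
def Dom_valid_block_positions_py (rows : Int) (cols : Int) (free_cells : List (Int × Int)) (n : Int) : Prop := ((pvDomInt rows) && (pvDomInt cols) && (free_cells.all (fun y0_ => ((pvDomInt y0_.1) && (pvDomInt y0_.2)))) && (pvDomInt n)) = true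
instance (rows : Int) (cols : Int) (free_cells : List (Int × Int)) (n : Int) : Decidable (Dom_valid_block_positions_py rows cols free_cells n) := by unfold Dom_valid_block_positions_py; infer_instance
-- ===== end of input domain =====

-- B replaces A's quadruple loop (rescanning the free-cell list per block cell) by a sparse
-- scatter-add: each distinct free cell increments a counter of every candidate position whose
-- n x n block covers it; a position is valid iff its counter reaches n*n.

-- ===== PORT A =====
-- inner 'for ic in range(n)' with its break: early-exit recursion over the range list
def aLoopIC (free_cells : List (Int × Int)) (a c : Int) (l : List Int) : Bool :=
  match l with
  | [] => true
  | ic :: rest => if (a, c + ic) ∈ free_cells then aLoopIC free_cells a c rest else false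

-- outer 'for ir in range(n)' with its break
def aLoopIR (free_cells : List (Int × Int)) (r c n : Int) (l : List Int) : Bool :=
  match l with
  | [] => true
  | ir :: rest =>
      if aLoopIC free_cells (r + ir) c (PySem.List.pyRange 0 n 1) then
        aLoopIR free_cells r c n rest
      else false

def valid_block_positions_py (rows : Int) (cols : Int) (free_cells : List (Int × Int)) (n : Int) : List (Int × Int) :=
  (PySem.List.pyRange 0 (rows - n + 1) 1).foldl (fun valid r =>
    (PySem.List.pyRange 0 (cols - n + 1) 1).foldl (fun valid c =>
      if aLoopIR free_cells r c n (PySem.List.pyRange 0 n 1) then PySem.Set.add valid (r, c)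
      else valid) valid) PySem.Set.empty

-- ===== PORT B =====
-- body of the scatter-add loop for one free cell (i, j): for every candidate
-- top-left (r, c) whose n x n block covers it, count[(r,c)] = count.get((r,c),0) + 1
def bRect (rows cols n : Int) (p : Int × Int) (d : PySem.Dict (Int × Int) Int) : PySem.Dict (Int × Int) Int :=
  (PySem.List.pyRange (max (p.1 - n + 1) 0) (min p.1 (rows - n) + 1) 1).foldl (fun d r =>
    (PySem.List.pyRange (max (p.2 - n + 1) 0) (min p.2 (cols - n) + 1) 1).foldl (fun d c =>
      d.insert (r, c) (d.getD (r, c) 0 + 1)) d) d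

def valid_block_positions_py_alt (rows : Int) (cols : Int) (free_cells : List (Int × Int)) (n : Int) : List (Int × Int) :=
  let count := (PySem.Set.ofList free_cells).foldl (fun d p => bRect rows cols n p d) PySem.Dict.empty
  let nn := n * n
  (PySem.List.pyRange 0 (rows - n + 1) 1).foldl (fun acc r =>
    (PySem.List.pyRange 0 (cols - n + 1) 1).foldl (fun acc c =>
      if count.getD (r, c) 0 = nn then PySem.Set.add acc (r, c) else acc) acc) PySem.Set.empty

-- ===== PRECONDITION & SPEC =====
-- Pre_ excludes negative block sizes n, outside the natural domain of an n x n block: there A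
-- vacuously reports every candidate position of its (then enlarged) position range, while B's
-- counters never reach the positive target n*n and it reports none.
def Pre_valid_block_positions_py (rows : Int) (cols : Int) (free_cells : List (Int × Int)) (n : Int) : Prop := 0 ≤ n
instance (rows : Int) (cols : Int) (free_cells : List (Int × Int)) (n : Int) : Decidable (Pre_valid_block_positions_py rows cols free_cells n) := by unfold Pre_valid_block_positions_py; infer_instance

def pvWitness_valid_block_positions_py : Int × Int × (List (Int × Int)) × Int := (2, 3, [(0, 0), (0, 1), (1, 0), (1, 1), (1, 2)], 2)

def Spec_valid_block_positions_py (rows : Int) (cols : Int) (free_cells : List (Int × Int)) (n : Int) (out : List (Int × Int)) : Prop := out = valid_block_positions_py_alt rows cols free_cells n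
instance (rows : Int) (cols : Int) (free_cells : List (Int × Int)) (n : Int) (out : List (Int × Int)) : Decidable (Spec_valid_block_positions_py rows cols free_cells n out) := by unfold Spec_valid_block_positions_py; infer_instance

-- ===== CLAIM (what is proved, stated in full; the proofs are below) =====
def Claim_equal_valid_block_positions_py : Prop := ∀ (rows : Int) (cols : Int) (free_cells : List (Int × Int)) (n : Int), Dom_valid_block_positions_py rows cols free_cells n → Pre_valid_block_positions_py rows cols free_cells n → Spec_valid_block_positions_py rows cols free_cells n (valid_block_positions_py rows cols free_cells n)

-- ===== LEMMAS AND PROOFS =====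

-- indicator of a free cell
def pvInd (fc : List (Int × Int)) (i j : Int) : Int := if (i, j) ∈ fc then 1 else 0

lemma pvInd_le_one (fc : List (Int × Int)) (i j : Int) : pvInd fc i j ≤ 1 := by
  unfold pvInd; split <;> norm_num

-- a 0/1 double sum reaches n*n exactly when every cell of the block is free
lemma pvSum_iff (fc : List (Int × Int)) {r c n : Int} (hn : 0 ≤ n) :
    (∑ i ∈ Finset.Ico r (r + n), ∑ j ∈ Finset.Ico c (c + n), pvInd fc i j) = n * n ↔
      ∀ i ∈ Finset.Ico r (r + n), ∀ j ∈ Finset.Ico c (c + n), (i, j) ∈ fc := by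
  have hcard1 : ((Finset.Ico r (r + n)).card : Int) = n := by
    have h := Int.card_Ico r (r + n); omega
  have hcard2 : ((Finset.Ico c (c + n)).card : Int) = n := by
    have h := Int.card_Ico c (c + n); omega
  have hrow : ∀ i : Int, ∑ j ∈ Finset.Ico c (c + n), (1 - pvInd fc i j) =
      n - ∑ j ∈ Finset.Ico c (c + n), pvInd fc i j := by
    intro i
    rw [Finset.sum_sub_distrib, Finset.sum_const, nsmul_eq_mul, mul_one, hcard2]
  have hcompl : ∑ i ∈ Finset.Ico r (r + n), ∑ j ∈ Finset.Ico c (c + n), (1 - pvInd fc i j) =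
      n * n - ∑ i ∈ Finset.Ico r (r + n), ∑ j ∈ Finset.Ico c (c + n), pvInd fc i j := by
    rw [Finset.sum_congr rfl (fun i _ => hrow i), Finset.sum_sub_distrib, Finset.sum_const,
        nsmul_eq_mul, hcard1]
  have hnn_term : ∀ i j : Int, 0 ≤ 1 - pvInd fc i j := by
    intro i j
    have := pvInd_le_one fc i j
    omega
  constructor
  · intro hS i hi j hj
    have hz : ∑ i ∈ Finset.Ico r (r + n), ∑ j ∈ Finset.Ico c (c + n), (1 - pvInd fc i j) = 0 := by
      rw [hcompl, hS]; ring
    have hrow0 := (Finset.sum_eq_zero_iff_of_nonneg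
      (fun i _ => Finset.sum_nonneg (fun j _ => hnn_term i j))).mp hz i hi
    have hterm0 := (Finset.sum_eq_zero_iff_of_nonneg (fun j _ => hnn_term i j)).mp hrow0 j hj
    have hone : pvInd fc i j = 1 := by omega
    by_contra hmem
    simp [pvInd, hmem] at hone
  · intro hall
    have h1 : ∀ i ∈ Finset.Ico r (r + n), ∑ j ∈ Finset.Ico c (c + n), pvInd fc i j = n := by
      intro i hi
      have : ∀ j ∈ Finset.Ico c (c + n), pvInd fc i j = 1 := by
        intro j hj; simp [pvInd, hall i hi j hj]
      rw [Finset.sum_congr rfl this, Finset.sum_const, nsmul_eq_mul, mul_one, hcard2]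
    rw [Finset.sum_congr rfl h1, Finset.sum_const, nsmul_eq_mul, hcard1]

-- A's inner loops are the universal membership test
lemma aLoopIC_iff (fc : List (Int × Int)) (a c : Int) (l : List Int) :
    aLoopIC fc a c l = true ↔ ∀ ic ∈ l, (a, c + ic) ∈ fc := by
  induction l with
  | nil => simp [aLoopIC]
  | cons x rest ih => by_cases h : (a, c + x) ∈ fc <;> simp [aLoopIC, h, ih]

lemma aLoopIR_iff (fc : List (Int × Int)) (r c n : Int) (l : List Int) :
    aLoopIR fc r c n l = true ↔ ∀ ir ∈ l, ∀ ic ∈ PySem.List.pyRange 0 n 1, (r + ir, c + ic) ∈ fc := by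
  induction l with
  | nil => simp [aLoopIR]
  | cons x rest ih =>
      simp only [aLoopIR]
      by_cases h : aLoopIC fc (r + x) c (PySem.List.pyRange 0 n 1) = true
      · rw [if_pos h, ih]
        have hx := (aLoopIC_iff fc (r + x) c _).mp h
        constructor
        · intro hall ir hir ic hic
          rcases List.mem_cons.mp hir with rfl | hir'
          · exact hx ic hic
          · exact hall ir hir' ic hic
        · intro hall ir hir ic hic
          exact hall ir (List.mem_cons_of_mem _ hir) ic hic
      · rw [if_neg h]
        constructor
        · intro hfalse; exact absurd hfalse (by simp)
        · intro hall
          exact absurd ((aLoopIC_iff fc (r + x) c _).mpr (fun ic hic => hall x List.mem_cons_self ic hic)) h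

-- one row of the scatter-add: increments exactly the keys (r, y) with a ≤ y < b
lemma pvCntInner (r b x y : Int) :
    ∀ (k : Nat) (a : Int) (d : PySem.Dict (Int × Int) Int), (b - a).toNat ≤ k →
      ((PySem.List.pyRange a b 1).foldl (fun d c => d.insert (r, c) (d.getD (r, c) 0 + 1)) d).getD (x, y) 0 =
        d.getD (x, y) 0 + (if x = r ∧ a ≤ y ∧ y < b then 1 else 0) := by
  intro k
  induction k with
  | zero =>
      intro a d hk
      rw [PySem.List.pyRange_one_eq_nil (by omega), if_neg (by omega)]
      simp
  | succ k ih =>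
      intro a d hk
      by_cases hab : b ≤ a
      · rw [PySem.List.pyRange_one_eq_nil hab, if_neg (by omega)]
        simp
      · rw [PySem.List.pyRange_one_cons (by omega)]
        simp only [List.foldl_cons]
        rw [ih (a + 1) _ (by omega), PySem.Dict.getD_insert]
        by_cases hkey : ((x : Int), (y : Int)) = ((r : Int), (a : Int))
        · obtain ⟨h1, h2⟩ := Prod.mk.injEq .. ▸ hkey
          rw [if_pos hkey, if_neg (by omega), if_pos (by omega), h1, h2]
          ring
        · have hk2 : ¬(x = r ∧ y = a) := fun hcon => hkey (by rw [hcon.1, hcon.2])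
          rw [if_neg hkey]
          by_cases hc1 : x = r ∧ a + 1 ≤ y ∧ y < b
          · rw [if_pos hc1, if_pos (by omega)]
          · rw [if_neg hc1, if_neg (by omega)]

-- a whole rectangle stamp: increments exactly the keys in [a, b1) x [a2, b2)
lemma pvCntOuter (b1 a2 b2 x y : Int) :
    ∀ (k : Nat) (a : Int) (d : PySem.Dict (Int × Int) Int), (b1 - a).toNat ≤ k →
      ((PySem.List.pyRange a b1 1).foldl (fun d r =>
          (PySem.List.pyRange a2 b2 1).foldl (fun d c =>
            d.insert (r, c) (d.getD (r, c) 0 + 1)) d) d).getD (x, y) 0 =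
        d.getD (x, y) 0 + (if a ≤ x ∧ x < b1 ∧ a2 ≤ y ∧ y < b2 then 1 else 0) := by
  intro k
  induction k with
  | zero =>
      intro a d hk
      rw [PySem.List.pyRange_one_eq_nil (show b1 ≤ a by omega),
          if_neg (show ¬(a ≤ x ∧ x < b1 ∧ a2 ≤ y ∧ y < b2) by omega)]
      simp
  | succ k ih =>
      intro a d hk
      by_cases hab : b1 ≤ a
      · rw [PySem.List.pyRange_one_eq_nil hab,
            if_neg (show ¬(a ≤ x ∧ x < b1 ∧ a2 ≤ y ∧ y < b2) by omega)]
        simp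
      · rw [PySem.List.pyRange_one_cons (show a < b1 by omega)]
        simp only [List.foldl_cons]
        rw [ih (a + 1) _ (by omega),
            pvCntInner a b2 x y ((b2 - a2).toNat) a2 d le_rfl]
        by_cases hx : x = a
        · rw [if_neg (show ¬(a + 1 ≤ x ∧ x < b1 ∧ a2 ≤ y ∧ y < b2) by omega)]
          by_cases hy : a2 ≤ y ∧ y < b2
          · rw [if_pos (show x = a ∧ a2 ≤ y ∧ y < b2 from ⟨hx, hy.1, hy.2⟩),
                if_pos (show a ≤ x ∧ x < b1 ∧ a2 ≤ y ∧ y < b2 by omega)]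
            ring
          · rw [if_neg (show ¬(x = a ∧ a2 ≤ y ∧ y < b2) from fun hcon => hy ⟨hcon.2.1, hcon.2.2⟩),
                if_neg (show ¬(a ≤ x ∧ x < b1 ∧ a2 ≤ y ∧ y < b2) from
                  fun hcon => hy ⟨hcon.2.2.1, hcon.2.2.2⟩)]
            ring
        · rw [if_neg (show ¬(x = a ∧ a2 ≤ y ∧ y < b2) from fun hcon => hx hcon.1)]
          by_cases hc1 : a + 1 ≤ x ∧ x < b1 ∧ a2 ≤ y ∧ y < b2
          · rw [if_pos hc1, if_pos (show a ≤ x ∧ x < b1 ∧ a2 ≤ y ∧ y < b2 by omega)]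
            ring
          · rw [if_neg hc1, if_neg (show ¬(a ≤ x ∧ x < b1 ∧ a2 ≤ y ∧ y < b2) from
                fun hcon => hc1 ⟨by omega, hcon.2.1, hcon.2.2⟩)]
            ring

-- the condition under which one free cell p contributes to position (x, y)
def pvCovers (rows cols n x y : Int) (p : Int × Int) : Bool :=
  decide (max (p.1 - n + 1) 0 ≤ x ∧ x ≤ min p.1 (rows - n) ∧
          max (p.2 - n + 1) 0 ≤ y ∧ y ≤ min p.2 (cols - n))

lemma pvCntList (rows cols n x y : Int) :
    ∀ (l : List (Int × Int)) (d : PySem.Dict (Int × Int) Int),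
      ((l.foldl (fun d p => bRect rows cols n p d) d).getD (x, y) 0) =
        d.getD (x, y) 0 + (l.countP (pvCovers rows cols n x y) : Int) := by
  intro l
  induction l with
  | nil => intro d; simp
  | cons p rest ih =>
      intro d
      simp only [List.foldl_cons]
      rw [ih, List.countP_cons]
      have hrect : (bRect rows cols n p d).getD (x, y) 0 =
          d.getD (x, y) 0 + (if pvCovers rows cols n x y p = true then 1 else 0) := by
        unfold bRect
        rw [pvCntOuter (min p.1 (rows - n) + 1) (max (p.2 - n + 1) 0) (min p.2 (cols - n) + 1) x y
            ((min p.1 (rows - n) + 1 - max (p.1 - n + 1) 0).toNat) (max (p.1 - n + 1) 0) d le_rfl]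
        unfold pvCovers
        by_cases hcov : max (p.1 - n + 1) 0 ≤ x ∧ x ≤ min p.1 (rows - n) ∧
            max (p.2 - n + 1) 0 ≤ y ∧ y ≤ min p.2 (cols - n)
        · rw [if_pos (show max (p.1 - n + 1) 0 ≤ x ∧ x < min p.1 (rows - n) + 1 ∧
              max (p.2 - n + 1) 0 ≤ y ∧ y < min p.2 (cols - n) + 1 by omega),
              if_pos (by exact decide_eq_true hcov)]
        · rw [if_neg (show ¬(max (p.1 - n + 1) 0 ≤ x ∧ x < min p.1 (rows - n) + 1 ∧
              max (p.2 - n + 1) 0 ≤ y ∧ y < min p.2 (cols - n) + 1) by omega),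
              if_neg (show ¬(decide (max (p.1 - n + 1) 0 ≤ x ∧ x ≤ min p.1 (rows - n) ∧
                max (p.2 - n + 1) 0 ≤ y ∧ y ≤ min p.2 (cols - n)) = true) from by
                simpa using hcov)]
      rw [hrect]
      push_cast
      ring

-- distinct free cells covering a candidate block, counted two ways
lemma pvCount_eq_sum (fc : List (Int × Int)) {rows cols n r c : Int} (hn : 0 ≤ n)
    (hr : 0 ≤ r) (hr2 : r + n ≤ rows) (hc : 0 ≤ c) (hc2 : c + n ≤ cols) :
    ((PySem.Set.ofList fc).countP (pvCovers rows cols n r c) : Int) =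
      ∑ i ∈ Finset.Ico r (r + n), ∑ j ∈ Finset.Ico c (c + n), pvInd fc i j := by
  have hq : ∀ p : Int × Int, pvCovers rows cols n r c p =
      decide (r ≤ p.1 ∧ p.1 < r + n ∧ c ≤ p.2 ∧ p.2 < c + n) := by
    intro p
    unfold pvCovers
    by_cases h : r ≤ p.1 ∧ p.1 < r + n ∧ c ≤ p.2 ∧ p.2 < c + n
    · rw [decide_eq_true (by omega), decide_eq_true h]
    · rw [decide_eq_false (by omega), decide_eq_false h]
  have hcard : (PySem.Set.ofList fc).countP (pvCovers rows cols n r c) =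
      (((Finset.Ico r (r + n)) ×ˢ (Finset.Ico c (c + n))).filter (fun p => p ∈ fc)).card := by
    rw [List.countP_eq_length_filter, List.filter_congr (fun p _ => hq p)]
    have hnd : ((PySem.Set.ofList fc).filter
        (fun p => decide (r ≤ p.1 ∧ p.1 < r + n ∧ c ≤ p.2 ∧ p.2 < c + n))).Nodup :=
      (PySem.Set.nodup_ofList fc).filter _
    rw [← List.toFinset_card_of_nodup hnd]
    congr 1
    ext p
    simp only [List.mem_toFinset, List.mem_filter, Finset.mem_filter, Finset.mem_product,
      Finset.mem_Ico, PySem.Set.mem_ofList, decide_eq_true_eq]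
    tauto
  have hsum : ∑ p ∈ (Finset.Ico r (r + n)) ×ˢ (Finset.Ico c (c + n)), pvInd fc p.1 p.2 =
      ∑ i ∈ Finset.Ico r (r + n), ∑ j ∈ Finset.Ico c (c + n), pvInd fc i j := by
    rw [Finset.sum_product]
  rw [hcard, ← hsum]
  unfold pvInd
  have heta : ∀ p : Int × Int, (if (p.1, p.2) ∈ fc then (1 : Int) else 0) = (if p ∈ fc then (1 : Int) else 0) := by
    intro p; rfl
  rw [Finset.sum_congr rfl (fun p _ => heta p), Finset.sum_boole]

-- generic fold congruence (pointwise-equal step functions give equal folds)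
lemma pvFoldlCongr {α β : Type} (l : List β) (f g : α → β → α)
    (h : ∀ x ∈ l, ∀ a, f a x = g a x) : ∀ a, l.foldl f a = l.foldl g a := by
  induction l with
  | nil => intro a; rfl
  | cons x rest ih =>
      intro a
      simp only [List.foldl_cons]
      rw [h x (by simp) a]
      exact ih (fun y hy a => h y (by simp [hy]) a) (g a x)

-- the two block tests agree on every candidate position
lemma pvCond_iff (fc : List (Int × Int)) (rows cols : Int)
    {r c n : Int} (hn : 0 ≤ n) (hr : 0 ≤ r) (hr2 : r + n ≤ rows) (hc : 0 ≤ c) (hc2 : c + n ≤ cols) :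
    (((PySem.Set.ofList fc).foldl (fun d p => bRect rows cols n p d) PySem.Dict.empty).getD (r, c) 0 = n * n) ↔
      aLoopIR fc r c n (PySem.List.pyRange 0 n 1) = true := by
  rw [pvCntList rows cols n r c (PySem.Set.ofList fc) PySem.Dict.empty]
  rw [PySem.Dict.getD_empty]
  rw [zero_add, pvCount_eq_sum fc hn hr hr2 hc hc2, pvSum_iff fc hn, aLoopIR_iff]
  constructor
  · intro hall ir hir ic hic
    rw [PySem.List.mem_pyRange_one] at hir hic
    exact hall (r + ir) (Finset.mem_Ico.mpr (by omega)) (c + ic) (Finset.mem_Ico.mpr (by omega))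
  · intro hall i hi j hj
    rw [Finset.mem_Ico] at hi hj
    have h2 := hall (i - r) (by rw [PySem.List.mem_pyRange_one]; omega)
      (j - c) (by rw [PySem.List.mem_pyRange_one]; omega)
    have e1 : r + (i - r) = i := by ring
    have e2 : c + (j - c) = j := by ring
    rwa [e1, e2] at h2

lemma pvMain (rows cols : Int) (fc : List (Int × Int)) (n : Int) (hn : 0 ≤ n) :
    valid_block_positions_py rows cols fc n = valid_block_positions_py_alt rows cols fc n := by
  unfold valid_block_positions_py valid_block_positions_py_alt
  apply pvFoldlCongr
  intro r hrmem acc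
  apply pvFoldlCongr
  intro c hcmem acc2
  rw [PySem.List.mem_pyRange_one] at hrmem hcmem
  have hcond := pvCond_iff fc rows cols hn
    (by omega : 0 ≤ r) (by omega : r + n ≤ rows) (by omega : 0 ≤ c) (by omega : c + n ≤ cols)
  exact if_congr hcond.symm rfl rfl

-- ===== VERDICT (by name: the statement is the Claim_ definition above) =====
theorem valid_block_positions_py_spec : Claim_equal_valid_block_positions_py := by
  intro rows cols fc n _hDom hPre
  unfold Spec_valid_block_positions_py
  exact pvMain rows cols fc n hPre
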